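-- pv_equiv track=rewrite | github.com/Sashobrine/Python-core | main/module5_string/homework_function/task2.py | negative_numbers
-- ===== SOURCE A (Python) =====
-- def negative_numbers(num1, num2):
--     new_list = []
--     if num1 < num2:
--         for i in range(num1, num2):
--             if i % 2:
--                 new_list.append(i)
--     else:
--         for i in range(num1, num2, -1):
--             if i % 2:
--                 new_list.append(i)
--     return new_list
-- ===== SOURCE B (Python) =====
-- def negative_numbers(num1, num2):
--     if num1 < num2:
--         start = num1 if num1 % 2 else num1 + 1
--         return list(range(start, num2, 2))
--     start = num1 if num1 % 2 else num1 - 1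
--     return list(range(start, num2, -2))
-- ===== Notes on version B (the rewrite author's own statement) =====
-- stated objective: idiomatic
-- what changed: B computes the first odd endpoint by parity adjustment and emits the result directly as a single stride-2 range, instead of A's element-by-element scan of the full range with a parity test and append per element.
import Mathlib
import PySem

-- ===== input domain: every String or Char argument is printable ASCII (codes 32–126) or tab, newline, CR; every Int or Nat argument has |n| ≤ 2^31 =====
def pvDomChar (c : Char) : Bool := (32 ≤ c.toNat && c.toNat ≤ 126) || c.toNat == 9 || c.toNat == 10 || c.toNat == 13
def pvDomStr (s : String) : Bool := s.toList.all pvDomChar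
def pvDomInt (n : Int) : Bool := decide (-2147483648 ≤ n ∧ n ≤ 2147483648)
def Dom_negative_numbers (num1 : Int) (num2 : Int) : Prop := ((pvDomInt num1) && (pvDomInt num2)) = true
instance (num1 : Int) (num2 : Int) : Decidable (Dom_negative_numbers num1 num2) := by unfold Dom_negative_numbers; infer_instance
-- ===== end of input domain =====

-- B replaces A's scan-every-integer-and-test-parity loops by a direct stride-2 range from the
-- first odd endpoint (no parity test per element); same return value, objective: idiomatic.

-- ===== PORT A =====
def negative_numbers (num1 : Int) (num2 : Int) : List Int :=
  if num1 < num2 then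
    (PySem.List.pyRange num1 num2 1).foldl
      (fun acc i => if PySem.Int.mod i 2 ≠ 0 then acc ++ [i] else acc) []
  else
    (PySem.List.pyRange num1 num2 (-1)).foldl
      (fun acc i => if PySem.Int.mod i 2 ≠ 0 then acc ++ [i] else acc) []

-- ===== PORT B =====
def negative_numbers_alt (num1 : Int) (num2 : Int) : List Int :=
  if num1 < num2 then
    PySem.List.pyRange (if PySem.Int.mod num1 2 ≠ 0 then num1 else num1 + 1) num2 2
  else
    PySem.List.pyRange (if PySem.Int.mod num1 2 ≠ 0 then num1 else num1 - 1) num2 (-2)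

-- ===== PRECONDITION & SPEC =====
def Spec_negative_numbers (num1 : Int) (num2 : Int) (out : List Int) : Prop := out = negative_numbers_alt num1 num2
instance (num1 : Int) (num2 : Int) (out : List Int) : Decidable (Spec_negative_numbers num1 num2 out) := by unfold Spec_negative_numbers; infer_instance

-- ===== CLAIM (what is proved, stated in full; the proofs are below) =====
def Claim_equal_negative_numbers : Prop := ∀ (num1 : Int) (num2 : Int), Dom_negative_numbers num1 num2 → Spec_negative_numbers num1 num2 (negative_numbers num1 num2)

-- ===== LEMMAS AND PROOFS =====

theorem pymod_two_eq_emod (a : Int) : PySem.Int.mod a 2 = a % 2 := by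
  simp [PySem.Int.mod, Int.fmod_eq_emod]

-- two strictly monotone (resp. antitone) integer lists with the same members are equal
theorem eq_of_pairwise_lt_of_mem {l1 l2 : List Int}
    (h1 : l1.Pairwise (· < ·)) (h2 : l2.Pairwise (· < ·))
    (hm : ∀ x, x ∈ l1 ↔ x ∈ l2) : l1 = l2 := by
  refine List.eq_of_perm_of_sorted (le := (· < ·)) (l₁ := l1) (l₂ := l2) (fun a b _ _ hab hba => absurd hba (by omega)) h1 h2 ?_
  exact (List.perm_ext_iff_of_nodup
    (h1.imp fun h => Int.ne_of_lt h) (h2.imp fun h => Int.ne_of_lt h)).2 hm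

theorem eq_of_pairwise_gt_of_mem {l1 l2 : List Int}
    (h1 : l1.Pairwise (· > ·)) (h2 : l2.Pairwise (· > ·))
    (hm : ∀ x, x ∈ l1 ↔ x ∈ l2) : l1 = l2 := by
  refine List.eq_of_perm_of_sorted (le := (· > ·)) (fun a b _ _ hab hba => absurd hba (by omega)) h1 h2 ?_
  exact (List.perm_ext_iff_of_nodup
    (h1.imp fun h => Int.ne_of_gt h) (h2.imp fun h => Int.ne_of_gt h)).2 hm

theorem pairwise_lt_pyRange_two (a b : Int) :
    (PySem.List.pyRange a b 2).Pairwise (· < ·) := by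
  rw [PySem.List.pyRange_of_pos a b (by norm_num)]
  exact List.pairwise_lt_range.map _ (fun _ _ h => by omega)

theorem pairwise_gt_pyRange_neg_two (a b : Int) :
    (PySem.List.pyRange a b (-2)).Pairwise (· > ·) := by
  rw [PySem.List.pyRange_of_neg a b (by norm_num)]
  exact List.pairwise_lt_range.map _ (fun _ _ h => by omega)

theorem pairwise_lt_filter_pyRange_one (a b : Int) (p : Int → Bool) :
    ((PySem.List.pyRange a b 1).filter p).Pairwise (· < ·) :=
  List.Pairwise.sublist List.filter_sublist (PySem.List.pairwise_lt_pyRange_one a b)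

theorem pairwise_gt_pyRange_neg_one (a b : Int) :
    (PySem.List.pyRange a b (-1)).Pairwise (· > ·) := by
  rw [PySem.List.pyRange_neg_one]
  exact List.pairwise_lt_range.map _ (fun _ _ h => by omega)

theorem pairwise_gt_filter_pyRange_neg_one (a b : Int) (p : Int → Bool) :
    ((PySem.List.pyRange a b (-1)).filter p).Pairwise (· > ·) :=
  List.Pairwise.sublist List.filter_sublist (pairwise_gt_pyRange_neg_one a b)

theorem negative_numbers_spec : Claim_equal_negative_numbers := by
  intro num1 num2 _
  show negative_numbers num1 num2 = negative_numbers_alt num1 num2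
  unfold negative_numbers negative_numbers_alt
  split
  · rw [PySem.List.foldl_append_ite_eq_filter, List.nil_append]
    refine eq_of_pairwise_lt_of_mem (pairwise_lt_filter_pyRange_one _ _ _)
      (pairwise_lt_pyRange_two _ _) (fun x => ?_)
    rw [List.mem_filter]
    simp only [PySem.List.mem_pyRange_one, PySem.List.mem_pyRange_iff_of_pos (by norm_num : (0:Int) < 2),
      decide_eq_true_eq, pymod_two_eq_emod]
    split <;> omega
  · rw [PySem.List.foldl_append_ite_eq_filter, List.nil_append]
    refine eq_of_pairwise_gt_of_mem (pairwise_gt_filter_pyRange_neg_one _ _ _)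
      (pairwise_gt_pyRange_neg_two _ _) (fun x => ?_)
    rw [List.mem_filter]
    simp only [PySem.List.mem_pyRange_neg_one, PySem.List.mem_pyRange_iff_of_neg (by norm_num : (-2:Int) < 0),
      decide_eq_true_eq, pymod_two_eq_emod, Int.neg_dvd]
    split <;> omega
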